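-- pv_equiv track=rewrite | github.com/hshk99/Autopack | src/autopack/apply/sanitize.py | classify_patch_files
-- ===== SOURCE A (Python) =====
-- from typing import List, Optional, Set, Tuple
--
-- def classify_patch_files(patch_content: str) -> Tuple[Set[str], Set[str]]:
--     """
--     Identify which files in a patch are new vs. existing.
--
--     Args:
--         patch_content: Patch content to analyze
--
--     Returns:
--         Tuple of (new_files, existing_files) as relative paths
--     """
--     new_files: Set[str] = set()
--     existing_files: Set[str] = set()
--     current_file = None
--
--     lines = patch_content.split("\n")
--     for line in lines:
--         if line.startswith("diff --git"):
--             parts = line.split()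
--             if len(parts) >= 4:
--                 current_file = parts[3][2:]  # b/path -> path
--             continue
--
--         if current_file is None:
--             continue
--
--         if line.startswith("new file mode") or line.startswith("--- /dev/null"):
--             new_files.add(current_file)
--         elif line.startswith("deleted file mode") or line.startswith("+++ /dev/null"):
--             existing_files.add(current_file)
--         elif line.startswith("--- a/") and "/dev/null" not in line:
--             existing_files.add(current_file)
--
--     return new_files, existing_files
-- ===== SOURCE B (Python) =====
-- def classify_patch_files(patch_content):
--     """Two-phase: group lines into 'diff --git' sections, then classify each
--     section's body with the file threaded across sections."""
--     lines = patch_content.split("\n")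
--     sections = []  # (optional header line, body lines)
--     header, body = None, []
--     for line in lines:
--         if line.startswith("diff --git"):
--             sections.append((header, body))
--             header, body = line, []
--         else:
--             body.append(line)
--     sections.append((header, body))
--
--     new_files, existing_files = set(), set()
--     current = None
--     for header, body in sections:
--         if header is not None:
--             parts = header.split()
--             if len(parts) >= 4:
--                 current = parts[3][2:]
--         if current is None:
--             continue
--         for line in body:
--             if line.startswith("new file mode") or line.startswith("--- /dev/null"):
--                 new_files.add(current)
--             elif line.startswith("deleted file mode") or line.startswith("+++ /dev/null"):
--                 existing_files.add(current)
--             elif line.startswith("--- a/") and "/dev/null" not in line: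
--                 existing_files.add(current)
--     return new_files, existing_files
-- ===== Notes on version B (the rewrite author's own statement) =====
-- stated objective: alternative
-- what changed: B first groups the patch lines into 'diff --git' sections and then classifies each section body with the current file threaded across sections, instead of A's single flat loop over all lines.
import Mathlib
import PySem

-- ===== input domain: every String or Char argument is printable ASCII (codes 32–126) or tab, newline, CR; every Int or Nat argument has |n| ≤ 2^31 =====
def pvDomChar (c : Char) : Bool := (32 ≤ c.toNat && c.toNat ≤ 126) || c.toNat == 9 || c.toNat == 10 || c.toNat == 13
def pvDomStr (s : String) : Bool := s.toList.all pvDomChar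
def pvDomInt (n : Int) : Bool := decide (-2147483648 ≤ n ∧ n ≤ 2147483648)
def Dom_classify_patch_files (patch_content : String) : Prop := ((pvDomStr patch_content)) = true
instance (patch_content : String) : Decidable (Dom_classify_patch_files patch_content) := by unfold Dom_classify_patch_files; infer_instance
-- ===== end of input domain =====

-- B regroups the patch into 'diff --git' sections (two-phase) instead of A's single flat loop; same result, same cost.

-- ===== PORT A =====
-- A's loop body: one line updates (new_files, existing_files, current_file)
def pvAStep (st : List String × List String × Option String) (line : String) :
    List String × List String × Option String :=
  if PySem.Str.startswith line "diff --git" then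
    let parts := PySem.Str.split₀ line
    if parts.length ≥ 4 then
      (st.1, st.2.1, some (PySem.Str.slice ((PySem.List.pyGet? parts 3).getD "") (some 2) none))
    else st
  else
    match st.2.2 with
    | none => st
    | some c =>
      if PySem.Str.startswith line "new file mode" || PySem.Str.startswith line "--- /dev/null" then
        (PySem.Set.add st.1 c, st.2.1, some c)
      else if PySem.Str.startswith line "deleted file mode" || PySem.Str.startswith line "+++ /dev/null" then
        (st.1, PySem.Set.add st.2.1 c, some c)
      else if PySem.Str.startswith line "--- a/" && !(PySem.Str.isIn "/dev/null" line) then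
        (st.1, PySem.Set.add st.2.1 c, some c)
      else st

def classify_patch_files (patch_content : String) : List String × List String :=
  let lines := (PySem.Str.split? patch_content "\n").getD []
  let st := lines.foldl pvAStep (([] : PySem.Set String), ([] : PySem.Set String), (none : Option String))
  (st.1, st.2.1)

-- ===== PORT B =====
-- phase 1: group the lines into (optional header, body) sections
def pvGroupStep (st : List (Option String × List String) × Option String × List String)
    (line : String) : List (Option String × List String) × Option String × List String :=
  if PySem.Str.startswith line "diff --git" then (st.1 ++ [(st.2.1, st.2.2)], some line, [])
  else (st.1, st.2.1, st.2.2 ++ [line])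

def pvSections (lines : List String) : List (Option String × List String) :=
  let st := lines.foldl pvGroupStep ([], none, [])
  st.1 ++ [(st.2.1, st.2.2)]

-- phase 2: classify one body line against the two sets for the current file c
def pvClassifyLine (p : List String × List String) (c line : String) : List String × List String :=
  if PySem.Str.startswith line "new file mode" || PySem.Str.startswith line "--- /dev/null" then
    (PySem.Set.add p.1 c, p.2)
  else if PySem.Str.startswith line "deleted file mode" || PySem.Str.startswith line "+++ /dev/null" then
    (p.1, PySem.Set.add p.2 c)
  else if PySem.Str.startswith line "--- a/" && !(PySem.Str.isIn "/dev/null" line) then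
    (p.1, PySem.Set.add p.2 c)
  else p

-- phase 2: one section, threading the current file across sections
def pvSecStep (st : List String × List String × Option String)
    (sec : Option String × List String) : List String × List String × Option String :=
  let cur : Option String :=
    match sec.1 with
    | some h =>
      let parts := PySem.Str.split₀ h
      if parts.length ≥ 4 then
        some (PySem.Str.slice ((PySem.List.pyGet? parts 3).getD "") (some 2) none)
      else st.2.2
    | none => st.2.2
  match cur with
  | none => (st.1, st.2.1, none)
  | some c =>
    let p := sec.2.foldl (fun p line => pvClassifyLine p c line) (st.1, st.2.1)
    (p.1, p.2, some c)

def classify_patch_files_alt (patch_content : String) : List String × List String :=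
  let secs := pvSections ((PySem.Str.split? patch_content "\n").getD [])
  let st := secs.foldl pvSecStep (([] : PySem.Set String), ([] : PySem.Set String), (none : Option String))
  (st.1, st.2.1)

-- ===== PRECONDITION & SPEC =====
def Spec_classify_patch_files (patch_content : String) (out : List String × List String) : Prop := out = classify_patch_files_alt patch_content
instance (patch_content : String) (out : List String × List String) : Decidable (Spec_classify_patch_files patch_content out) := by unfold Spec_classify_patch_files; infer_instance

-- ===== CLAIM (what is proved, stated in full; the proofs are below) =====
def Claim_equal_classify_patch_files : Prop := ∀ (patch_content : String), Dom_classify_patch_files patch_content → Spec_classify_patch_files patch_content (classify_patch_files patch_content)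

-- ===== LEMMAS AND PROOFS =====

-- a section rendered back to its lines
def pvFlat (sec : Option String × List String) : List String :=
  match sec.1 with
  | some h => h :: sec.2
  | none => sec.2

-- a well-formed section: the header is a 'diff --git' line, body lines are not
def pvSecOK (sec : Option String × List String) : Prop :=
  (∀ h, sec.1 = some h → PySem.Str.startswith h "diff --git" = true) ∧
  (∀ l ∈ sec.2, PySem.Str.startswith l "diff --git" = false)

theorem pvSections_flat (lines : List String) :
    ∀ (acc : List (Option String × List String)) (hdr : Option String) (body : List String),
      (lines.foldl pvGroupStep (acc, hdr, body)).1.flatMap pvFlat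
        ++ pvFlat ((lines.foldl pvGroupStep (acc, hdr, body)).2.1,
                   (lines.foldl pvGroupStep (acc, hdr, body)).2.2)
      = acc.flatMap pvFlat ++ pvFlat (hdr, body) ++ lines := by
  induction lines with
  | nil => intro acc hdr body; simp
  | cons l ls ih =>
    intro acc hdr body
    by_cases h : PySem.Str.startswith l "diff --git" = true
    · simp only [List.foldl_cons, pvGroupStep, h, if_pos]
      rw [ih]
      simp [pvFlat]
    · simp only [List.foldl_cons, pvGroupStep, if_neg h]
      rw [ih]
      cases hdr <;> simp [pvFlat]

theorem pvSections_ok (lines : List String) :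
    ∀ (acc : List (Option String × List String)) (hdr : Option String) (body : List String),
      (∀ sec ∈ acc, pvSecOK sec) → pvSecOK (hdr, body) →
      ∀ sec ∈ (lines.foldl pvGroupStep (acc, hdr, body)).1 ++
          [((lines.foldl pvGroupStep (acc, hdr, body)).2.1,
            (lines.foldl pvGroupStep (acc, hdr, body)).2.2)],
        pvSecOK sec := by
  induction lines with
  | nil =>
    intro acc hdr body hacc hcur sec hsec
    simp at hsec
    rcases hsec with h | h
    · exact hacc sec h
    · rw [h]; exact hcur
  | cons l ls ih =>
    intro acc hdr body hacc hcur sec hsec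
    by_cases h : PySem.Str.startswith l "diff --git" = true
    · simp only [List.foldl_cons, pvGroupStep, h, if_pos] at hsec
      refine ih _ _ _ ?_ ?_ sec hsec
      · intro s hs
        rcases List.mem_append.mp hs with hs | hs
        · exact hacc s hs
        · simp at hs; rw [hs]; exact hcur
      · exact ⟨by intro h' hh; cases hh; exact h, by simp⟩
    · simp only [List.foldl_cons, pvGroupStep, if_neg h] at hsec
      refine ih _ _ _ hacc ?_ sec hsec
      refine ⟨hcur.1, ?_⟩
      intro x hx
      rcases List.mem_append.mp hx with hx | hx
      · exact hcur.2 x hx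
      · simp at hx; rw [hx]; simpa using h

-- A's step on a non-header line with a known current file = B's line classifier
theorem pvAStep_body (nf ef : List String) (c line : String)
    (h : PySem.Str.startswith line "diff --git" = false) :
    pvAStep (nf, ef, some c) line =
      ((pvClassifyLine (nf, ef) c line).1, (pvClassifyLine (nf, ef) c line).2, some c) := by
  simp only [pvAStep, pvClassifyLine, h]
  split_ifs <;> simp_all

-- A's step skips a non-header line when no current file is known
theorem pvAStep_none (nf ef : List String) (line : String)
    (h : PySem.Str.startswith line "diff --git" = false) :
    pvAStep (nf, ef, (none : Option String)) line = (nf, ef, none) := by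
  simp only [pvAStep, h]
  split_ifs <;> simp_all

-- folding A's step over header-free lines
theorem pvAStep_bodyFold (body : List String)
    (hb : ∀ l ∈ body, PySem.Str.startswith l "diff --git" = false) :
    ∀ (nf ef : List String) (cur : Option String),
      body.foldl pvAStep (nf, ef, cur) =
        match cur with
        | none => (nf, ef, none)
        | some c =>
          ((body.foldl (fun p line => pvClassifyLine p c line) (nf, ef)).1,
           (body.foldl (fun p line => pvClassifyLine p c line) (nf, ef)).2, some c) := by
  induction body with
  | nil => intro nf ef cur; cases cur <;> simp
  | cons l ls ih =>
    intro nf ef cur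
    have hl := hb l (List.mem_cons_self ..)
    have hls : ∀ x ∈ ls, PySem.Str.startswith x "diff --git" = false :=
      fun x hx => hb x (List.mem_cons_of_mem _ hx)
    cases cur with
    | none =>
      simp only [List.foldl_cons, pvAStep_none nf ef l hl]
      exact ih hls nf ef none
    | some c =>
      simp only [List.foldl_cons, pvAStep_body nf ef c l hl]
      rw [ih hls]

-- A's step on a header line only updates the current file
theorem pvAStep_header (nf ef : List String) (cur : Option String) (h : String)
    (hh : PySem.Str.startswith h "diff --git" = true) :
    pvAStep (nf, ef, cur) h =
      (nf, ef,
        if (PySem.Str.split₀ h).length ≥ 4 then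
          some (PySem.Str.slice ((PySem.List.pyGet? (PySem.Str.split₀ h) 3).getD "") (some 2) none)
        else cur) := by
  simp only [pvAStep, hh, if_pos]
  split_ifs <;> simp_all

-- per-section agreement
theorem pvSec_agree (sec : Option String × List String) (hok : pvSecOK sec)
    (st : List String × List String × Option String) :
    (pvFlat sec).foldl pvAStep st = pvSecStep st sec := by
  obtain ⟨hdr, body⟩ := sec
  obtain ⟨nf, ef, cur⟩ := st
  cases hdr with
  | none =>
    show body.foldl pvAStep (nf, ef, cur) = _
    rw [pvAStep_bodyFold body hok.2 nf ef cur]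
    cases cur <;> rfl
  | some h =>
    have hh := hok.1 h rfl
    show (h :: body).foldl pvAStep (nf, ef, cur) = _
    rw [List.foldl_cons, pvAStep_header nf ef cur h hh,
        pvAStep_bodyFold body hok.2]
    by_cases hp : (PySem.Str.split₀ h).length ≥ 4
    · simp only [pvSecStep, hp, if_pos]
    · simp only [pvSecStep, if_neg hp]

theorem pvFoldl_flatMap {α β γ : Type} (g : β → List α) (f : γ → α → γ) (l : List β) :
    ∀ (b : γ), (l.flatMap g).foldl f b = l.foldl (fun b x => (g x).foldl f b) b := by
  induction l with
  | nil => intro b; rfl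
  | cons x xs ih => intro b; simp [List.flatMap_cons, List.foldl_append, ih]

-- ===== VERDICT (by name: the statement is the Claim_ definition above) =====
theorem classify_patch_files_spec : Claim_equal_classify_patch_files := by
  intro patch_content _
  unfold Spec_classify_patch_files classify_patch_files classify_patch_files_alt
  set lines := (PySem.Str.split? patch_content "\n").getD [] with hl
  have hflat : (pvSections lines).flatMap pvFlat = lines := by
    have := pvSections_flat lines [] none []
    simpa [pvSections, pvFlat] using this
  have hok : ∀ sec ∈ pvSections lines, pvSecOK sec := by
    have := pvSections_ok lines [] none []
    intro sec hsec
    refine this ?_ ?_ sec (by simpa [pvSections] using hsec)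
    · simp
    · exact ⟨by simp, by simp⟩
  have key : lines.foldl pvAStep (([] : PySem.Set String), ([] : PySem.Set String), (none : Option String))
      = (pvSections lines).foldl pvSecStep (([] : PySem.Set String), ([] : PySem.Set String), (none : Option String)) := by
    conv_lhs => rw [← hflat, pvFoldl_flatMap]
    exact PySem.List.foldl_congr_mem _ _ _ _
      (fun st sec hsec => pvSec_agree sec (hok sec hsec) st)
  simp only [key]
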